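-- pv_equiv track=rewrite | github.com/santilp95/proyecto_tesis | scripts/script_tesis.py | contar_tipos_enzimas
-- ===== SOURCE A (Python) =====
-- def contar_tipos_enzimas(lista_primer_ec):
--     oxidorreductasas = 0
--     transferasas = 0
--     hidrolasas = 0
--     liasas = 0
--     isomerasas = 0
--     ligasas = 0
--     translocasas = 0
--     for x in lista_primer_ec:
--         if x == '1':
--             oxidorreductasas += 1
--         if x == '2':
--             transferasas += 1
--         if x == '3':
--             hidrolasas += 1
--         if x == '4':
--             liasas += 1
--         if x == '5':
--             isomerasas += 1
--         if x == '6':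
--             ligasas += 1
--         if x == '7':
--             translocasas += 1
--     df_conteo_tipos_enzimas = [oxidorreductasas, transferasas, hidrolasas,
--                                liasas, isomerasas, ligasas, translocasas]
--     return df_conteo_tipos_enzimas
-- ===== SOURCE B (Python) =====
-- def contar_tipos_enzimas(lista_primer_ec):
--     return [lista_primer_ec.count(str(i)) for i in range(1, 8)]
-- ===== Notes on version B (the rewrite author's own statement) =====
-- stated objective: simpler
-- what changed: Replaces the single branch-heavy scan over seven parallel accumulators with a comprehension that makes one independent counting pass per EC class 1..7.
import Mathlib
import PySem

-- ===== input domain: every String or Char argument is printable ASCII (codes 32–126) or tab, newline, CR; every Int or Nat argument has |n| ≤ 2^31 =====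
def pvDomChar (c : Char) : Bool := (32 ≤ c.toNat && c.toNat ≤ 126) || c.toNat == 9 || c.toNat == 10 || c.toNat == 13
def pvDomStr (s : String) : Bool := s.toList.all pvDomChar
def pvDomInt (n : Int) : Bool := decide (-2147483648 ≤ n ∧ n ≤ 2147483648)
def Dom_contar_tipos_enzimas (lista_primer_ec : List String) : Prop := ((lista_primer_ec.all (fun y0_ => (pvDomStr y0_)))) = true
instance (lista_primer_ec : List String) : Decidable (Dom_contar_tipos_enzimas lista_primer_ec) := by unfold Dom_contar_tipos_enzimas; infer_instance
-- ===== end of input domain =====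

-- B replaces A's single scan with seven parallel accumulators by one independent
-- counting pass per EC class 1..7 (simpler; not claimed faster).

-- ===== PORT A =====
def contar_tipos_enzimas (lista_primer_ec : List String) : List Int :=
  let s := lista_primer_ec.foldl
    (fun (s : Int × Int × Int × Int × Int × Int × Int) x =>
      let oxidorreductasas := if x == "1" then s.1 + 1 else s.1
      let transferasas := if x == "2" then s.2.1 + 1 else s.2.1
      let hidrolasas := if x == "3" then s.2.2.1 + 1 else s.2.2.1
      let liasas := if x == "4" then s.2.2.2.1 + 1 else s.2.2.2.1
      let isomerasas := if x == "5" then s.2.2.2.2.1 + 1 else s.2.2.2.2.1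
      let ligasas := if x == "6" then s.2.2.2.2.2.1 + 1 else s.2.2.2.2.2.1
      let translocasas := if x == "7" then s.2.2.2.2.2.2 + 1 else s.2.2.2.2.2.2
      (oxidorreductasas, transferasas, hidrolasas, liasas, isomerasas, ligasas, translocasas))
    (0, 0, 0, 0, 0, 0, 0)
  [s.1, s.2.1, s.2.2.1, s.2.2.2.1, s.2.2.2.2.1, s.2.2.2.2.2.1, s.2.2.2.2.2.2]

-- ===== PORT B =====
def contar_tipos_enzimas_alt (lista_primer_ec : List String) : List Int :=
  (PySem.List.pyRange 1 8 1).map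
    (fun i => (PySem.List.count lista_primer_ec (PySem.Int.toStr i) : Int))

-- ===== PRECONDITION & SPEC =====
def Spec_contar_tipos_enzimas (lista_primer_ec : List String) (out : List Int) : Prop := out = contar_tipos_enzimas_alt lista_primer_ec
instance (lista_primer_ec : List String) (out : List Int) : Decidable (Spec_contar_tipos_enzimas lista_primer_ec out) := by unfold Spec_contar_tipos_enzimas; infer_instance

-- ===== CLAIM (what is proved, stated in full; the proofs are below) =====
def Claim_equal_contar_tipos_enzimas : Prop := ∀ (lista_primer_ec : List String), Dom_contar_tipos_enzimas lista_primer_ec → Spec_contar_tipos_enzimas lista_primer_ec (contar_tipos_enzimas lista_primer_ec)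

-- ===== LEMMAS AND PROOFS =====

theorem pvLoopA_eq (xs : List String) :
    ∀ (o t h l i g tr : Int),
    xs.foldl
      (fun (s : Int × Int × Int × Int × Int × Int × Int) x =>
        let oxidorreductasas := if x == "1" then s.1 + 1 else s.1
        let transferasas := if x == "2" then s.2.1 + 1 else s.2.1
        let hidrolasas := if x == "3" then s.2.2.1 + 1 else s.2.2.1
        let liasas := if x == "4" then s.2.2.2.1 + 1 else s.2.2.2.1
        let isomerasas := if x == "5" then s.2.2.2.2.1 + 1 else s.2.2.2.2.1
        let ligasas := if x == "6" then s.2.2.2.2.2.1 + 1 else s.2.2.2.2.2.1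
        let translocasas := if x == "7" then s.2.2.2.2.2.2 + 1 else s.2.2.2.2.2.2
        (oxidorreductasas, transferasas, hidrolasas, liasas, isomerasas, ligasas, translocasas))
      (o, t, h, l, i, g, tr)
    = (o + xs.count "1", t + xs.count "2", h + xs.count "3", l + xs.count "4",
       i + xs.count "5", g + xs.count "6", tr + xs.count "7") := by
  induction xs with
  | nil => intro o t h l i g tr; simp
  | cons x xs ih =>
    intro o t h l i g tr
    simp only [List.foldl_cons, ih, List.count_cons, Prod.mk.injEq]
    refine ⟨?_, ?_, ?_, ?_, ?_, ?_, ?_⟩ <;> (split_ifs <;> simp <;> ring)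

theorem contar_tipos_enzimas_spec : Claim_equal_contar_tipos_enzimas := by
  intro xs _
  unfold Spec_contar_tipos_enzimas contar_tipos_enzimas contar_tipos_enzimas_alt
  have hr : PySem.List.pyRange 1 8 1 = [1, 2, 3, 4, 5, 6, 7] := by decide
  rw [hr]
  simp only [List.map, pvLoopA_eq, PySem.List.count_eq]
  have h1 : PySem.Int.toStr 1 = "1" := by decide
  have h2 : PySem.Int.toStr 2 = "2" := by decide
  have h3 : PySem.Int.toStr 3 = "3" := by decide
  have h4 : PySem.Int.toStr 4 = "4" := by decide
  have h5 : PySem.Int.toStr 5 = "5" := by decide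
  have h6 : PySem.Int.toStr 6 = "6" := by decide
  have h7 : PySem.Int.toStr 7 = "7" := by decide
  rw [h1, h2, h3, h4, h5, h6, h7]
  simp
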